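-- pv_equiv track=rewrite | github.com/wuzhaoqi1015/leetcode_code_python | Easy/1688.py | numberOfMatches
-- ===== SOURCE A (Python) =====
-- def numberOfMatches(n: int) -> int:
--     total_matches = 0
--     current_teams = n
--
--     while current_teams > 1:
--         if current_teams % 2 == 0:
--             # 偶数队伍：进行n/2场比赛，晋级n/2支队伍
--             matches = current_teams // 2
--             total_matches += matches
--             current_teams = matches
--         else:
--             # 奇数队伍：进行(n-1)/2场比赛，晋级(n-1)/2 + 1支队伍
--             matches = (current_teams - 1) // 2
--             total_matches += matches
--             current_teams = matches + 1
--
--     return total_matches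
-- ===== SOURCE B (Python) =====
-- def numberOfMatches(n: int) -> int:
--     # every eliminated team loses exactly one match
--     return max(n - 1, 0)
-- ===== Notes on version B (the rewrite author's own statement) =====
-- stated objective: faster
-- what changed: Replaces the round-by-round halving loop with the closed form max(n-1, 0): each eliminated team accounts for exactly one match.
import Mathlib
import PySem

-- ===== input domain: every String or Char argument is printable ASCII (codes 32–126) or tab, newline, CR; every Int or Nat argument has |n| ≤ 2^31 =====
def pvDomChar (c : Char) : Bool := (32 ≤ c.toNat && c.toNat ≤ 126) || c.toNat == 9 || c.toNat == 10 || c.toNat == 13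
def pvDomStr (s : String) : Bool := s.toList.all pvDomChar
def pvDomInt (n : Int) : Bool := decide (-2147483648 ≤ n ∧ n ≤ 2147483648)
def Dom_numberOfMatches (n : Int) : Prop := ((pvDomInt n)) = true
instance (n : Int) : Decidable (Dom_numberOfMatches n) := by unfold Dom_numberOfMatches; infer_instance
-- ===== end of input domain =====

-- B replaces A's round-by-round halving loop with the closed form max(n-1, 0) (faster: O(1) vs O(log n)).

-- ===== PORT A =====
-- the while loop of A, state = (total_matches, current_teams)
def numberOfMatchesLoop (total cur : Int) : Int :=
  if _h : cur > 1 then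
    if PySem.Int.mod cur 2 = 0 then
      numberOfMatchesLoop (total + PySem.Int.floordiv cur 2) (PySem.Int.floordiv cur 2)
    else
      numberOfMatchesLoop (total + PySem.Int.floordiv (cur - 1) 2)
        (PySem.Int.floordiv (cur - 1) 2 + 1)
  else total
termination_by cur.toNat
decreasing_by
  · rw [PySem.Int.floordiv_eq_ediv_of_pos (by omega)]; omega
  · rw [PySem.Int.floordiv_eq_ediv_of_pos (by omega)]; omega

def numberOfMatches (n : Int) : Int := numberOfMatchesLoop 0 n

-- ===== PORT B =====
def numberOfMatches_alt (n : Int) : Int := max (n - 1) 0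

-- ===== PRECONDITION & SPEC =====
def Spec_numberOfMatches (n : Int) (out : Int) : Prop := out = numberOfMatches_alt n
instance (n : Int) (out : Int) : Decidable (Spec_numberOfMatches n out) := by unfold Spec_numberOfMatches; infer_instance

-- ===== CLAIM (what is proved, stated in full; the proofs are below) =====
def Claim_equal_numberOfMatches : Prop := ∀ (n : Int), Dom_numberOfMatches n → Spec_numberOfMatches n (numberOfMatches n)

-- ===== LEMMAS AND PROOFS =====
theorem numberOfMatchesLoop_closed (total cur : Int) :
    numberOfMatchesLoop total cur = total + max (cur - 1) 0 := by
  induction total, cur using numberOfMatchesLoop.induct with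
  | case1 total cur h he ih =>
    rw [numberOfMatchesLoop, dif_pos h, if_pos he, ih]
    have h2 : PySem.Int.mod cur 2 = cur % 2 := PySem.Int.mod_eq_emod_of_pos (by omega)
    rw [h2] at he
    rw [PySem.Int.floordiv_eq_ediv_of_pos (by omega)]
    omega
  | case2 total cur h he ih =>
    rw [numberOfMatchesLoop, dif_pos h, if_neg he, ih]
    have h2 : PySem.Int.mod cur 2 = cur % 2 := PySem.Int.mod_eq_emod_of_pos (by omega)
    rw [h2] at he
    rw [PySem.Int.floordiv_eq_ediv_of_pos (by omega)]
    omega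
  | case3 total cur h =>
    rw [numberOfMatchesLoop, dif_neg h]
    omega

-- ===== VERDICT (by name: the statement is the Claim_ definition above) =====
theorem numberOfMatches_spec : Claim_equal_numberOfMatches := by
  intro n _
  unfold Spec_numberOfMatches numberOfMatches numberOfMatches_alt
  rw [numberOfMatchesLoop_closed]
  omega
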